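-- pv_equiv track=rewrite | github.com/adutev/Programming-0 | week4/pair-with-prime-sum.py | prime_pais
-- ===== SOURCE A (Python) =====
-- def prime_pais(numbers):
--     for i in range(0, len(numbers)):
--         for j in range(0, len(numbers)):
--             sum = numbers[i] + numbers[j]
--             if is_prime(sum):
--                 return True
--                 break
--     return False
--
-- def is_prime(n):
--     if n <= 1:
--         return False
--
--     is_prime = True
--
--     start = 2
--
--     while start < n:
--         if n % start == 0:
--             is_prime = False
--             break
--
--         start += 1
--
--     return is_prime
-- ===== SOURCE B (Python) =====
-- def prime_pais(numbers):
--     return any(_is_prime_sqrt(x + y) for x in numbers for y in numbers)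
--
-- def _is_prime_sqrt(n):
--     if n < 2:
--         return False
--     d = 2
--     while d * d <= n:
--         if n % d == 0:
--             return False
--         d += 1
--     return True
-- ===== Notes on version B (the rewrite author's own statement) =====
-- stated objective: alternative
-- what changed: B tests each pairwise sum with sqrt-bounded trial division (divisors only while d*d <= n) instead of A's trial division over every d < n, and iterates the pairs directly with any() over elements instead of nested index loops with an early return.
import Mathlib
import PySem

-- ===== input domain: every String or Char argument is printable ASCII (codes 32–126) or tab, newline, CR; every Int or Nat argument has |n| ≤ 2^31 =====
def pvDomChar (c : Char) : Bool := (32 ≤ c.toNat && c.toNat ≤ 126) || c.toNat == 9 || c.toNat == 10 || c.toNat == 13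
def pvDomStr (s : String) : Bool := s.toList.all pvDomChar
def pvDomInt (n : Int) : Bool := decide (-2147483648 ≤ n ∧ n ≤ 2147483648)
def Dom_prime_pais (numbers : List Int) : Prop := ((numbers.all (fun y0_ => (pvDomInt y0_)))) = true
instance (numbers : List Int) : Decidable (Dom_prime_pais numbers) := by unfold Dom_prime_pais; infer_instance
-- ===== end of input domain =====

-- B replaces A's O(n)-step trial division with √n-bounded trial division and the
-- indexed nested loops with a direct any-over-elements pass (alternative/simpler).

-- ===== PORT A =====
-- A's is_prime while loop: start counts up from 2 while start < n.
def isPrimeLoopA (n start : Int) : Bool :=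
  if start < n then
    if PySem.Int.mod n start == 0 then false
    else isPrimeLoopA n (start + 1)
  else true
termination_by (n - start).toNat
decreasing_by omega

def is_prime_A (n : Int) : Bool :=
  if n ≤ 1 then false else isPrimeLoopA n 2

-- A: for i in range(0,len), for j in range(0,len): return True on a prime sum.
def prime_pais (numbers : List Int) : Bool :=
  (PySem.List.pyRange 0 (numbers.length : Int) 1).any (fun i =>
    (PySem.List.pyRange 0 (numbers.length : Int) 1).any (fun j =>
      is_prime_A (PySem.List.pyGetD numbers i 0 + PySem.List.pyGetD numbers j 0)))

-- ===== PORT B =====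
-- B's _is_prime_sqrt while loop: d counts up from 2 while d*d ≤ n.
def isPrimeLoopB (n d : Int) : Bool :=
  if d * d ≤ n then
    if PySem.Int.mod n d == 0 then false
    else isPrimeLoopB n (d + 1)
  else true
termination_by (n - d + 1).toNat
decreasing_by
  have hdn : d ≤ n := by nlinarith
  omega

def is_prime_sqrt (n : Int) : Bool :=
  if n < 2 then false else isPrimeLoopB n 2

def prime_pais_alt (numbers : List Int) : Bool :=
  numbers.any (fun x => numbers.any (fun y => is_prime_sqrt (x + y)))

-- ===== PRECONDITION & SPEC =====
def Spec_prime_pais (numbers : List Int) (out : Bool) : Prop := out = prime_pais_alt numbers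
instance (numbers : List Int) (out : Bool) : Decidable (Spec_prime_pais numbers out) := by unfold Spec_prime_pais; infer_instance

-- ===== CLAIM (what is proved, stated in full; the proofs are below) =====
def Claim_equal_prime_pais : Prop := ∀ (numbers : List Int), Dom_prime_pais numbers → Spec_prime_pais numbers (prime_pais numbers)

-- ===== LEMMAS AND PROOFS =====

theorem isPrimeLoopA_char (n s : Int) :
    isPrimeLoopA n s = true ↔ ∀ d : Int, s ≤ d → d < n → PySem.Int.mod n d ≠ 0 := by
  induction s using isPrimeLoopA.induct (n := n) with
  | case1 s hlt hmod =>
    rw [isPrimeLoopA, if_pos hlt, if_pos hmod]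
    simp only [beq_iff_eq] at hmod
    constructor
    · intro h; exact absurd h (by simp)
    · intro h; exact absurd hmod (h s le_rfl hlt)
  | case2 s hlt hmod ih =>
    rw [isPrimeLoopA, if_pos hlt, if_neg hmod]
    simp only [beq_iff_eq] at hmod
    rw [ih]
    constructor
    · intro h d hsd hdn
      rcases eq_or_lt_of_le hsd with rfl | hlt'
      · exact hmod
      · exact h d (by omega) hdn
    · intro h d hsd hdn; exact h d (by omega) hdn
  | case3 s hlt =>
    rw [isPrimeLoopA, if_neg hlt]
    constructor
    · intro _ d hsd hdn; omega
    · intro _; rfl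

theorem isPrimeLoopB_char (n s : Int) :
    1 ≤ s → (isPrimeLoopB n s = true ↔ ∀ d : Int, s ≤ d → d * d ≤ n → PySem.Int.mod n d ≠ 0) := by
  induction s using isPrimeLoopB.induct (n := n) with
  | case1 s hle hmod =>
    intro hs
    rw [isPrimeLoopB, if_pos hle, if_pos hmod]
    simp only [beq_iff_eq] at hmod
    constructor
    · intro h; exact absurd h (by simp)
    · intro h; exact absurd hmod (h s le_rfl hle)
  | case2 s hle hmod ih =>
    intro hs
    rw [isPrimeLoopB, if_pos hle, if_neg hmod]
    simp only [beq_iff_eq] at hmod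
    rw [ih (by omega)]
    constructor
    · intro h d hsd hdd
      rcases eq_or_lt_of_le hsd with rfl | hlt'
      · exact hmod
      · exact h d (by omega) hdd
    · intro h d hsd hdd; exact h d (by omega) hdd
  | case3 s hle =>
    intro hs
    rw [isPrimeLoopB, if_neg hle]
    constructor
    · intro _ d hsd hdd
      exact absurd hdd (by nlinarith)
    · intro _; rfl

-- a divisor below n forces a divisor below √n
theorem divisor_bridge (n : Int) (hn : 2 ≤ n)
    (hB : ∀ d : Int, 2 ≤ d → d * d ≤ n → PySem.Int.mod n d ≠ 0) :
    ∀ d : Int, 2 ≤ d → d < n → PySem.Int.mod n d ≠ 0 := by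
  intro d hd2 hdn hmod
  have hdvd : d ∣ n := (PySem.Int.mod_eq_zero_iff_dvd n d).mp hmod
  obtain ⟨e, he⟩ := hdvd
  have he2 : 2 ≤ e := by
    rcases (by omega : e ≤ 0 ∨ e = 1 ∨ 2 ≤ e) with h | h | h
    · nlinarith
    · subst h; omega
    · exact h
  by_cases hc : d * d ≤ n
  · exact hB d hd2 hc hmod
  · rw [not_le] at hc
    have hed : e < d := by nlinarith
    have hee : e * e ≤ n := by nlinarith
    have hedvd : e ∣ n := ⟨d, by rw [he]; ring⟩
    exact hB e he2 hee ((PySem.Int.mod_eq_zero_iff_dvd n e).mpr hedvd)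

theorem is_prime_eq (n : Int) : is_prime_A n = is_prime_sqrt n := by
  unfold is_prime_A is_prime_sqrt
  by_cases h : n ≤ 1
  · rw [if_pos h, if_pos (by omega)]
  · rw [if_neg (by omega), if_neg (by omega)]
    have hn : 2 ≤ n := by omega
    have hA := isPrimeLoopA_char n 2
    have hB := isPrimeLoopB_char n 2 (by omega)
    cases h1 : isPrimeLoopA n 2 <;> cases h2 : isPrimeLoopB n 2
    · rfl
    · exfalso
      rw [h1] at hA; rw [h2] at hB
      have := divisor_bridge n hn (hB.mp rfl)
      simp only [Bool.false_eq_true, false_iff] at hA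
      exact hA this
    · exfalso
      rw [h1] at hA; rw [h2] at hB
      simp only [Bool.false_eq_true, false_iff] at hB
      exact hB (fun d hd2 hdd => hA.mp rfl d hd2 (by nlinarith))
    · rfl

theorem any_idx (xs : List Int) (f : Int → Bool) :
    (PySem.List.pyRange 0 (xs.length : Int) 1).any (fun i => f (PySem.List.pyGetD xs i 0)) = xs.any f := by
  conv_rhs => rw [← PySem.List.map_pyGetD_pyRange_zero' xs 0]
  rw [List.any_map]
  rfl

-- ===== VERDICT (by name: the statement is the Claim_ definition above) =====
theorem prime_pais_spec : Claim_equal_prime_pais := by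
  intro numbers _
  unfold Spec_prime_pais prime_pais prime_pais_alt
  rw [any_idx numbers (fun x =>
    (PySem.List.pyRange 0 (numbers.length : Int) 1).any (fun j =>
      is_prime_A (x + PySem.List.pyGetD numbers j 0)))]
  refine List.any_congr rfl (fun x => ?_)
  rw [any_idx numbers (fun y => is_prime_A (x + y))]
  exact List.any_congr rfl (fun y => is_prime_eq (x + y))
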